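-- pv_equiv track=rewrite | github.com/demonicangel317/Python-sortation-algorithm | python sortation.py | searchedmatches
-- ===== SOURCE A (Python) =====
-- def searchedmatches(results, searchScore):
--     """
--     This function takes in a sorted list and then it returns another list which will have the searched values.
--     If the searched values are not present then the elements with the next greatest value will be returned in a new list.
--     IF no greater elements are found then this will return a null list
--     :param results: the list of results used to find the search values
--     :param searchScore:the integer input that is used to find the search value
--     :return: a list which may contain the search results
--     Time Complexity:
--         Worst:
--         O(2N) = O(N) N = length of the input list
--         Best:
--         O(N) =  N = length of the input list
--
--     Auxillary Time Complexity:
--         In a case where this list has all equal values for the score and it is all greater than this the seacrh value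
--         then we will place all the items of the list in the list we return
--         therefore this will take,
--         O(N) space N = number of elements in the input list
--     Input Time Complexity:
--         O(N) space N = number of elements in the input list
--     Precondtion:
--         Results List must be fully sorted
--
--     """
--     searchList = []
--     index = 0
--     while (index < len(results) and results[index][2] >= searchScore):
--         temp = results[index]
--         if (results[index][2] == searchScore):
--
--             searchList.append(results[index])
--         index += 1
--
--     higherScore = 0
--     if (len(searchList) == 0):
--         index -= 1
--         higherScore = 0
--         if (index >= 0):
--             higherScore = results[index][2]
--             index = 0
--             while (index < len(results) and results[index][2] >= searchScore):
--                 temp = results[index]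
--                 if (results[index][2] == higherScore):
--                     searchList.append(results[index])
--                 index += 1
--     return searchList
-- ===== SOURCE B (Python) =====
-- def searchedmatches(results, searchScore):
--     # One pass: group the qualifying prefix rows by their score in an
--     # insertion-ordered dict and remember the last score seen; then answer by
--     # dictionary lookup (exact score if present, otherwise the last = smallest
--     # qualifying score), so no filtering or second scan is ever done.
--     groups = {}
--     last = None
--     for row in results:
--         sc = row[2]
--         if sc < searchScore:
--             break
--         groups[sc] = groups.get(sc, []) + [row]
--         last = sc
--     if searchScore in groups:
--         return groups[searchScore]
--     if last is not None:
--         return groups[last]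
--     return []
-- ===== Notes on version B (the rewrite author's own statement) =====
-- stated objective: alternative
-- what changed: A's scan-collecting-exact-matches followed by a decrement-and-rescan fallback loop is replaced by one pass that groups qualifying rows by score into an insertion-ordered dict (remembering the last score seen) and answers by a single dictionary lookup, so no filtering or second scan exists.
-- outside the precondition, e.g. on searchedmatches([[0, 0, 1], [9]], 5): A returns [], B returns []
import Mathlib
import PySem

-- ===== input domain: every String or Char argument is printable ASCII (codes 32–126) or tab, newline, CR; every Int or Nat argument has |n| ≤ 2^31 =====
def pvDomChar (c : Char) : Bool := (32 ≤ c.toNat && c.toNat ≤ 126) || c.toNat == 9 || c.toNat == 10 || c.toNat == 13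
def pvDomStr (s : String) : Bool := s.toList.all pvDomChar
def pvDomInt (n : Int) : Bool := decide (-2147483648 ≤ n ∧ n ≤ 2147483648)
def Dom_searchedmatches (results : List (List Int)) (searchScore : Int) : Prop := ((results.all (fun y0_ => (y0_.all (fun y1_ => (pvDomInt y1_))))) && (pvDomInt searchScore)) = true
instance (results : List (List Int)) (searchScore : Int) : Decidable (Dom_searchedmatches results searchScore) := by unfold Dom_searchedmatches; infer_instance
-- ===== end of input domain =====

-- B replaces A's exact-match scan plus decrement-and-rescan fallback by a single pass
-- that groups qualifying rows by score into an insertion-ordered dict and answers by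
-- lookup; objective: alternative (same cost, no second scan), same return value.

-- ===== PORT A =====
-- results[index][2], totalised: under Pre_ every accessed row exists and has ≥ 3 entries
def pvRowScore (results : List (List Int)) (i : Nat) : Int :=
  (PySem.List.pyGet? (results.getD i []) 2).getD 0

-- A's while-loop shape, used twice in A with different collected score `c`:
-- scan while results[index][2] >= searchScore, appending rows whose score == c
def pvScan (results : List (List Int)) (searchScore c : Int) (index : Nat)
    (acc : List (List Int)) : List (List Int) × Nat :=
  if h : index < results.length ∧ searchScore ≤ pvRowScore results index then
    pvScan results searchScore c (index + 1)
      (if pvRowScore results index == c then acc ++ [results.getD index []] else acc)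
  else (acc, index)
termination_by results.length - index
decreasing_by
  have := h.1
  omega

def searchedmatches (results : List (List Int)) (searchScore : Int) : List (List Int) :=
  let r1 := pvScan results searchScore searchScore 0 []
  let searchList := r1.1
  let index := r1.2
  if searchList.length == 0 then
    let index' : Int := (index : Int) - 1
    if 0 ≤ index' then
      let higherScore := pvRowScore results index'.toNat
      (pvScan results searchScore higherScore 0 []).1
    else searchList
  else searchList

-- ===== PORT B =====
-- row[2], totalised the same way
def pvAltScore (r : List Int) : Int := (PySem.List.pyGet? r 2).getD 0

-- Source B's for/break loop: groups[sc] = groups.get(sc, []) + [row] is Dict.modify sc [] (· ++ [row]);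
-- `last` is the last score appended (None before any)
def pvBuildGroups (searchScore : Int) :
    List (List Int) → PySem.Dict Int (List (List Int)) → Option Int →
    PySem.Dict Int (List (List Int)) × Option Int
  | [], groups, last => (groups, last)
  | row :: rest, groups, last =>
    let sc := pvAltScore row
    if sc < searchScore then (groups, last)
    else pvBuildGroups searchScore rest (groups.modify sc [] (· ++ [row])) (some sc)

def searchedmatches_alt (results : List (List Int)) (searchScore : Int) : List (List Int) :=
  let r := pvBuildGroups searchScore results PySem.Dict.empty none
  let groups := r.1
  if groups.contains searchScore then groups.getD searchScore []  -- groups[searchScore], key present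
  else
    match r.2 with
    | some last => groups.getD last []   -- groups[last]: the key is present whenever last is not None
    | none => []

-- ===== PRECONDITION & SPEC =====
-- Pre_ excludes rows with fewer than 3 entries: Python raises IndexError on row[2]
-- whenever such a row is reached by the scan; this also excludes some inputs on which A
-- returns (a short row sitting after the scan's stopping point is never touched).
def Pre_searchedmatches (results : List (List Int)) (searchScore : Int) : Prop :=
  ∀ r ∈ results, 3 ≤ r.length
instance (results : List (List Int)) (searchScore : Int) : Decidable (Pre_searchedmatches results searchScore) := by unfold Pre_searchedmatches; infer_instance

def pvWitness_searchedmatches : List (List Int) × Int :=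
  ([[1, 2, 9], [3, 4, 5], [5, 6, 5], [7, 8, 1]], 5)

def Spec_searchedmatches (results : List (List Int)) (searchScore : Int) (out : List (List Int)) : Prop := out = searchedmatches_alt results searchScore
instance (results : List (List Int)) (searchScore : Int) (out : List (List Int)) : Decidable (Spec_searchedmatches results searchScore out) := by unfold Spec_searchedmatches; infer_instance

-- ===== CLAIM (what is proved, stated in full; the proofs are below) =====
def Claim_equal_searchedmatches : Prop := ∀ (results : List (List Int)) (searchScore : Int), Dom_searchedmatches results searchScore → Pre_searchedmatches results searchScore → Spec_searchedmatches results searchScore (searchedmatches results searchScore)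

-- ===== LEMMAS AND PROOFS =====

-- the qualifying prefix both programs traverse (proof-side characterisation)
def pvPrefix (results : List (List Int)) (searchScore : Int) : List (List Int) :=
  match results with
  | [] => []
  | row :: rest =>
    if pvAltScore row < searchScore then []
    else row :: pvPrefix rest searchScore

lemma pvRowScore_eq (rs : List (List Int)) (i : Nat) (h : i < rs.length) :
    pvRowScore rs i = pvAltScore rs[i] := by
  simp [pvRowScore, pvAltScore, List.getElem?_eq_getElem h]

lemma pvPrefix_takeWhile (rs : List (List Int)) (s : Int) :
    pvPrefix rs s = rs.takeWhile (fun r => decide (s ≤ pvAltScore r)) := by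
  induction rs with
  | nil => rfl
  | cons row rest ih =>
    by_cases h : pvAltScore row < s
    · have h' : ¬ s ≤ pvAltScore row := not_le.2 h
      simp [pvPrefix, h, h']
    · have h' : s ≤ pvAltScore row := not_lt.1 h
      simp [pvPrefix, h, h', ih]

lemma pvScan_eq (rs : List (List Int)) (s c : Int) :
    ∀ (n index : Nat) (acc : List (List Int)), rs.length - index = n → index ≤ rs.length →
      pvScan rs s c index acc =
        (acc ++ (pvPrefix (rs.drop index) s).filter (fun r => pvAltScore r == c),
         index + (pvPrefix (rs.drop index) s).length) := by
  intro n
  induction n with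
  | zero =>
    intro index acc hn _
    have hidx : index = rs.length := by omega
    rw [pvScan, dif_neg (by rintro ⟨h, -⟩; omega)]
    simp [hidx, List.drop_length, pvPrefix]
  | succ n ih =>
    intro index acc hn hle
    have hlt : index < rs.length := by omega
    have hdrop : rs.drop index = rs[index] :: rs.drop (index + 1) :=
      List.drop_eq_getElem_cons hlt
    have hsc : pvAltScore rs[index] = pvRowScore rs index := (pvRowScore_eq rs index hlt).symm
    rw [pvScan]
    by_cases hge : s ≤ pvRowScore rs index
    · have hpre : pvPrefix (rs[index] :: rs.drop (index + 1)) s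
          = rs[index] :: pvPrefix (rs.drop (index + 1)) s := by
        simp [pvPrefix, hsc, not_lt.2 hge]
      rw [dif_pos ⟨hlt, hge⟩, ih (index + 1) _ (by omega) (by omega), hdrop, hpre,
        List.filter_cons]
      by_cases hc : pvRowScore rs index = c
      · apply Prod.ext
        · simp [hsc, hc, List.getElem?_eq_getElem hlt]
        · simp
          omega
      · apply Prod.ext
        · simp [hsc, hc]
        · simp
          omega
    · rw [dif_neg (by rintro ⟨-, h⟩; exact hge h), hdrop]
      have hnil : pvPrefix (rs[index] :: rs.drop (index + 1)) s = [] := by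
        simp [pvPrefix, hsc, not_le.1 hge]
      rw [hnil]
      simp

lemma pvPrefix_getD_last (rs : List (List Int)) (s : Int)
    (hp : pvPrefix rs s ≠ []) :
    rs.getD ((pvPrefix rs s).length - 1) [] = (pvPrefix rs s).getLast hp := by
  have hpre : pvPrefix rs s <+: rs := by
    rw [pvPrefix_takeWhile]; exact List.takeWhile_prefix _
  have hlen : (pvPrefix rs s).length ≤ rs.length := hpre.length_le
  have hpos : 0 < (pvPrefix rs s).length := List.length_pos_iff.2 hp
  have hlt : (pvPrefix rs s).length - 1 < rs.length := by omega
  rw [List.getD_eq_getElem rs [] hlt, List.getLast_eq_getElem]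
  exact (hpre.getElem (by omega)).symm

-- (a :: l).getLast?.or last = l.getLast?.or (some a)
lemma pvGetLast_or (a : List Int) (l : List (List Int)) (last : Option Int)
    (f : List Int → Int) :
    ((a :: l).map f).getLast?.or (last) = (l.map f).getLast?.or (some (f a)) := by
  cases l with
  | nil => simp
  | cons b t =>
    simp only [List.map_cons, List.getLast?_cons_cons]
    cases hx : (f b :: List.map f t).getLast? with
    | none => simp at hx
    | some x => rfl

-- the B loop builds exactly the grouping fold over the prefix, and last = score of its last row
lemma pvBuildGroups_eq (s : Int) (rs : List (List Int))
    (d : PySem.Dict Int (List (List Int))) (last : Option Int) :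
    pvBuildGroups s rs d last =
      (((pvPrefix rs s).map (fun r => (pvAltScore r, r))).foldl
          (fun d p => d.modify p.1 [] (· ++ [p.2])) d,
       ((pvPrefix rs s).map pvAltScore).getLast?.or last) := by
  induction rs generalizing d last with
  | nil => simp [pvBuildGroups, pvPrefix]
  | cons row rest ih =>
    by_cases h : pvAltScore row < s
    · simp [pvBuildGroups, pvPrefix, h]
    · rw [pvBuildGroups, if_neg h]
      have hpre : pvPrefix (row :: rest) s = row :: pvPrefix rest s := by
        simp [pvPrefix, h]
      rw [ih, hpre, pvGetLast_or]
      simp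

lemma pvGroups_getD (P : List (List Int)) (c : Int) :
    ((P.map (fun r => (pvAltScore r, r))).foldl
        (fun d p => d.modify p.1 [] (· ++ [p.2])) PySem.Dict.empty).getD c [] =
      P.filter (fun r => pvAltScore r == c) := by
  rw [PySem.Dict.getD_foldl_modify_append]
  rw [List.filter_map, List.map_map]
  simp [Function.comp_def, PySem.Dict.getD_empty]

lemma pvGroups_contains (P : List (List Int)) (c : Int) :
    ((P.map (fun r => (pvAltScore r, r))).foldl
        (fun d p => d.modify p.1 [] (· ++ [p.2])) PySem.Dict.empty).contains c =
      decide (c ∈ P.map pvAltScore) := by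
  rw [PySem.Dict.contains_eq_decide_mem_keys]
  have hk := PySem.Dict.keys_foldl_modify_key
      (l := P.map (fun r => (pvAltScore r, r))) (key := Prod.fst)
      (d0 := ([] : List (List Int))) (f := fun _ p => (· ++ [p.2]))
      (d := PySem.Dict.empty)
  rw [hk]
  simp only [PySem.Dict.keys_empty, List.map_map]
  have : (P.map (fun r => (pvAltScore r, r))).map Prod.fst = P.map pvAltScore := by
    simp [Function.comp_def]
  rw [List.map_map] at this
  rw [this]
  simp only [PySem.Set.update, ← PySem.Set.ofList_eq_foldl]
  simp [PySem.Set.mem_ofList]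

theorem searchedmatches_eq_alt (rs : List (List Int)) (s : Int) :
    searchedmatches rs s = searchedmatches_alt rs s := by
  have hscan := fun c => pvScan_eq rs s c rs.length 0 [] (by omega) (by omega)
  simp only [List.drop_zero, List.nil_append] at hscan
  simp only [searchedmatches, searchedmatches_alt,
    pvBuildGroups_eq s rs PySem.Dict.empty none, hscan]
  simp only [pvGroups_getD, pvGroups_contains, Option.or_none]
  by_cases hex : (pvPrefix rs s).filter (fun r => pvAltScore r == s) = []
  · have hmem : s ∉ (pvPrefix rs s).map pvAltScore := by
      intro hm
      rcases List.mem_map.1 hm with ⟨r, hr, hsc⟩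
      have : r ∈ (pvPrefix rs s).filter (fun r => pvAltScore r == s) :=
        List.mem_filter.2 ⟨hr, by simp [hsc]⟩
      simp [hex] at this
    by_cases hp : pvPrefix rs s = []
    · simp [hp]
    · have hpos : 0 < (pvPrefix rs s).length := List.length_pos_iff.2 hp
      have htoNat : (((pvPrefix rs s).length : Int) - 1).toNat
          = (pvPrefix rs s).length - 1 := by omega
      have h1 : 1 ≤ (pvPrefix rs s).length := hpos
      have hlastm : ((pvPrefix rs s).map pvAltScore).getLast? =
          some (pvAltScore ((pvPrefix rs s).getLast hp)) := by
        rw [List.getLast?_eq_some_getLast (by simp [hp]), List.getLast_map]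
      have hlast := pvPrefix_getD_last rs s hp
      rw [List.getD_eq_getElem?_getD] at hlast
      simp [hmem, h1, htoNat, hlastm, pvRowScore, hlast, pvAltScore]
      intro x hx hs
      exact False.elim (hmem (List.mem_map.2 ⟨x, hx, (by simpa [pvAltScore] using hs : pvAltScore x = s)⟩))
  · have hne : ((pvPrefix rs s).filter (fun r => pvAltScore r == s)).length ≠ 0 := by
      simpa [List.length_eq_zero_iff] using hex
    have hmem : s ∈ (pvPrefix rs s).map pvAltScore := by
      rcases List.exists_mem_of_ne_nil _ hex with ⟨r, hr⟩
      rcases List.mem_filter.1 hr with ⟨hr1, hr2⟩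
      exact List.mem_map.2 ⟨r, hr1, by simpa using hr2⟩
    simp [hne, hmem]

-- ===== VERDICT (by name: the statement is the Claim_ definition above) =====
theorem searchedmatches_spec : Claim_equal_searchedmatches := by
  intro rs s _ _
  exact searchedmatches_eq_alt rs s
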